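-- pv_equiv track=rewrite | github.com/o-evdokimov/otus-python-2020-11 | lesson-3_git-shell/main.py | get_part_list
-- ===== SOURCE A (Python) =====
-- def get_part_list(init_list, filter_type):
--     res = []
--     for item in init_list:
--         if filter_type=='even':
--             if item % 2 == 0:
--                 res.append(item)
--         elif filter_type == 'odd':
--             if item % 2 != 0:
--                 res.append(item)
--         elif filter_type=='simple':
--             simple = True
--             if item > 0:
--                 for i in range(2, item):
--                     if item % i == 0:
--                         simple = False
--                         break
--                 if simple:
--                     res.append(item)
--     return res
-- ===== SOURCE B (Python) =====
-- def _no_small_factor(n):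
--     d = 2
--     while d * d <= n:
--         if n % d == 0:
--             return False
--         d += 1
--     return True
--
--
-- def get_part_list(init_list, filter_type):
--     if filter_type == 'even':
--         return [x for x in init_list if x % 2 == 0]
--     if filter_type == 'odd':
--         return [x for x in init_list if x % 2 != 0]
--     if filter_type == 'simple':
--         return [x for x in init_list if x > 0 and _no_small_factor(x)]
--     return []
-- ===== Notes on version B (the rewrite author's own statement) =====
-- stated objective: faster
-- what changed: Replaces the single append-loop with four-way branching inside it by a one-time dispatch on filter_type to a single filter pass, and replaces the O(n) trial division over all i in range(2, item) by an O(sqrt n) divisor scan that stops once d*d > item.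
import Mathlib
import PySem

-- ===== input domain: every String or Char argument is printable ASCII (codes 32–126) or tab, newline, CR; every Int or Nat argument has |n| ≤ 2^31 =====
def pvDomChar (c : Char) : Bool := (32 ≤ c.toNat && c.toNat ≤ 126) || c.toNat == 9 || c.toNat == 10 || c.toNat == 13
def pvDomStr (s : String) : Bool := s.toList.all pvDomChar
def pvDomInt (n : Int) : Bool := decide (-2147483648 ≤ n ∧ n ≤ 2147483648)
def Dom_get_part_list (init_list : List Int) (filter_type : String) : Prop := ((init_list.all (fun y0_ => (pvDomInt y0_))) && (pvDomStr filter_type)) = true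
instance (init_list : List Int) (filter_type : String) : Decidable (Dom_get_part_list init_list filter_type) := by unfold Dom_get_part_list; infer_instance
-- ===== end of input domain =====

-- B replaces the per-item branching append-loop by one dispatch to a single filter pass,
-- and the O(item) trial division by an O(sqrt item) scan stopping once d*d > item (objective: faster).

-- ===== PORT A =====
-- 'for i in range(2, item): if item % i == 0: simple = False; break' — returns the final 'simple' flag
def trialLoop (item : Int) : List Int → Bool
  | [] => true
  | i :: rest => if PySem.Int.mod item i == 0 then false else trialLoop item rest

def get_part_list (init_list : List Int) (filter_type : String) : List Int :=
  init_list.foldl (fun res item =>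
    if filter_type == "even" then
      if PySem.Int.mod item 2 == 0 then res ++ [item] else res
    else if filter_type == "odd" then
      if !(PySem.Int.mod item 2 == 0) then res ++ [item] else res
    else if filter_type == "simple" then
      if item > 0 then
        if trialLoop item (PySem.List.pyRange 2 item 1) then res ++ [item] else res
      else res
    else res) []

-- ===== PORT B =====
-- 'd = 2; while d*d <= n: if n % d == 0: return False; d += 1; return True'
def noSmallFactor (n : Int) (d : Int) : Bool :=
  if d * d ≤ n then
    if PySem.Int.mod n d == 0 then false else noSmallFactor n (d + 1)
  else true
termination_by (n + 1 - d).toNat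
decreasing_by
  have h1 : 2 * d ≤ n + 1 := by nlinarith [sq_nonneg (d - 1)]
  have h2 : (0 : Int) ≤ n := le_trans (mul_self_nonneg d) (by assumption)
  omega

def get_part_list_alt (init_list : List Int) (filter_type : String) : List Int :=
  if filter_type == "even" then init_list.filter (fun x => PySem.Int.mod x 2 == 0)
  else if filter_type == "odd" then init_list.filter (fun x => !(PySem.Int.mod x 2 == 0))
  else if filter_type == "simple" then init_list.filter (fun x => decide (0 < x) && noSmallFactor x 2)
  else []

-- ===== PRECONDITION & SPEC =====
def Spec_get_part_list (init_list : List Int) (filter_type : String) (out : List Int) : Prop := out = get_part_list_alt init_list filter_type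
instance (init_list : List Int) (filter_type : String) (out : List Int) : Decidable (Spec_get_part_list init_list filter_type out) := by unfold Spec_get_part_list; infer_instance

-- ===== CLAIM (what is proved, stated in full; the proofs are below) =====
def Claim_equal_get_part_list : Prop := ∀ (init_list : List Int) (filter_type : String), Dom_get_part_list init_list filter_type → Spec_get_part_list init_list filter_type (get_part_list init_list filter_type)

-- ===== LEMMAS AND PROOFS =====

lemma trialLoop_true_iff (n : Int) (l : List Int) :
    trialLoop n l = true ↔ ∀ i ∈ l, ¬ i ∣ n := by
  induction l with
  | nil => simp [trialLoop]
  | cons i rest ih =>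
    simp only [trialLoop, List.mem_cons]
    split_ifs with h
    · simp only [false_iff]
      intro hc
      exact hc i (Or.inl rfl) ((PySem.Int.mod_eq_zero_iff_dvd n i).mp (by simpa using h))
    · constructor
      · intro ht j hj
        rcases hj with rfl | hj
        · intro hd
          exact h (by simpa using (PySem.Int.mod_eq_zero_iff_dvd n j).mpr hd)
        · exact (ih.mp ht) j hj
      · intro hall; exact ih.mpr (fun j hj => hall j (Or.inr hj))

lemma noSmallFactor_true_iff (n : Int) (d : Int) (hd : 1 ≤ d) :
    noSmallFactor n d = true ↔ ∀ e, d ≤ e → e * e ≤ n → ¬ e ∣ n := by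
  fun_induction noSmallFactor n d with
  | case1 d hle hmod =>
    simp only [Bool.false_eq_true, false_iff]
    intro hc
    exact hc d (le_refl d) hle ((PySem.Int.mod_eq_zero_iff_dvd n d).mp (by simpa using hmod))
  | case2 d hle hmod ih =>
    rw [ih (by omega)]
    constructor
    · intro hall e he hee
      rcases eq_or_lt_of_le he with heq | hlt
      · subst heq
        intro hdvd
        exact hmod (by simpa using (PySem.Int.mod_eq_zero_iff_dvd n d).mpr hdvd)
      · exact hall e (by omega) hee
    · intro hall e he hee; exact hall e (by omega) hee
  | case3 d hgt =>
    simp only [true_iff]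
    intro e he hee hdvd
    have hgt' : n < d * d := by omega
    have hdd : d * d ≤ e * e := mul_le_mul he he (by omega) (by omega)
    linarith

-- For positive n, the full trial division and the sqrt-bounded scan agree.
lemma trial_eq_noSmallFactor (n : Int) (hn : 0 < n) :
    trialLoop n (PySem.List.pyRange 2 n 1) = noSmallFactor n 2 := by
  rw [Bool.eq_iff_iff, trialLoop_true_iff, noSmallFactor_true_iff n 2 (by omega)]
  simp only [PySem.List.mem_pyRange_one]
  constructor
  · intro hall e he hee hdvd
    have hlt : e < n := by nlinarith
    exact hall e ⟨he, hlt⟩ hdvd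
  · intro hall i ⟨h2i, hin⟩ hdvd
    by_cases hii : i * i ≤ n
    · exact hall i h2i hii hdvd
    · have hii' : n < i * i := by omega
      obtain ⟨j, hj⟩ := hdvd
      have hjpos : 0 < j := by nlinarith
      have hji : j < i := by nlinarith
      have hj2 : 2 ≤ j := by
        rcases eq_or_lt_of_le (by omega : (1:Int) ≤ j) with h1 | h1
        · exfalso; rw [hj, ← h1] at hin; omega
        · omega
      exact hall j hj2 (by nlinarith) ⟨i, by linarith [hj, mul_comm i j]⟩

-- ===== VERDICT (by name: the statement is the Claim_ definition above) =====
theorem get_part_list_spec : Claim_equal_get_part_list := by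
  intro init_list filter_type _
  unfold Spec_get_part_list get_part_list get_part_list_alt
  by_cases he : filter_type == "even"
  · simp only [he, if_true]
    exact PySem.List.foldl_append_if_eq_filter _ _ _
  · by_cases ho : filter_type == "odd"
    · simp only [he, ho, Bool.false_eq_true, if_true, if_false]
      exact PySem.List.foldl_append_if_eq_filter _ _ _
    · by_cases hs : filter_type == "simple"
      · simp only [he, ho, hs, Bool.false_eq_true, if_true, if_false]
        have hfun : (fun (res : List Int) (item : Int) =>
            if item > 0 then
              if trialLoop item (PySem.List.pyRange 2 item 1) then res ++ [item] else res
            else res)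
            = fun res item => if (decide (0 < item) && noSmallFactor item 2) then res ++ [item] else res := by
          funext res item
          by_cases hp : 0 < item
          · simp only [hp, if_true, decide_true, Bool.true_and, trial_eq_noSmallFactor item hp]
          · simp [hp]
        rw [hfun]
        exact PySem.List.foldl_append_if_eq_filter _ _ _
      · simp [he, ho, hs]
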